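-- pv_equiv track=rewrite | github.com/Canziyos/learning-algorithms | evolutionary_computation/crossover_t.py | infer_slice_bounds
-- ===== SOURCE A (Python) =====
-- def infer_slice_bounds(child, p1):
--     # find the longest interior contiguous segment where child == p1
--     n = len(child)
--     best_len = 0
--     best = (None, None)
--     cur_len = 0
--     cur_start = None
--     for i in range(1, n-1):
--         if child[i] == p1[i]:
--             if cur_len == 0:
--                 cur_start = i
--             cur_len += 1
--             if cur_len > best_len:
--                 best_len = cur_len
--                 best = (cur_start, i)
--         else:
--             cur_len = 0
--     return best  # (slice_st, slice_end)
-- ===== SOURCE B (Python) =====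
-- def infer_slice_bounds(child, p1):
--     # two-phase: build the maximal matching interior runs first, then pick the first strictly-longest one
--     n = len(child)
--     runs = []
--     cur = None  # (start, end) of the open run, inclusive
--     for i in range(1, n - 1):
--         if child[i] == p1[i]:
--             cur = (i, i) if cur is None else (cur[0], i)
--         else:
--             if cur is not None:
--                 runs.append(cur)
--             cur = None
--     if cur is not None:
--         runs.append(cur)
--     best = (None, None)
--     best_len = 0
--     for s, e in runs:
--         if e - s + 1 > best_len:
--             best_len = e - s + 1
--             best = (s, e)
--     return best
-- ===== Notes on version B (the rewrite author's own statement) =====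
-- stated objective: alternative
-- what changed: A tracks best_len/best/cur_len/cur_start eagerly in one pass; B first collects the maximal contiguous matching interior runs as (start,end) pairs and then selects the first strictly-longest run in a second pass.
import Mathlib
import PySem

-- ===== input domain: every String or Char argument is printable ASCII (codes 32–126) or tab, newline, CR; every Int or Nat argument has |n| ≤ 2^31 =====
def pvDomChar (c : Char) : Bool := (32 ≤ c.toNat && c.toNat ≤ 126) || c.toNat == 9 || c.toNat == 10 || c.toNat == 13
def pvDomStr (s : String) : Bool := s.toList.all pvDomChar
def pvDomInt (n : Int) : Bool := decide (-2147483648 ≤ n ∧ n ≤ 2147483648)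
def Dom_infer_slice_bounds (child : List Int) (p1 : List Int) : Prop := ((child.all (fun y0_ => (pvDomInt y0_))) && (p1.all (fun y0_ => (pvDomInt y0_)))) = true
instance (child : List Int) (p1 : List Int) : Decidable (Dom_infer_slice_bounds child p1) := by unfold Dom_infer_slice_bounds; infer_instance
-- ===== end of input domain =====

-- B rebuilds the result in two phases (collect maximal matching runs, then pick the first longest);
-- equivalence with A's single-pass eager-best loop is proved on all inputs where Python A returns.

-- ===== PORT A =====
-- loop body of A; state is (best_len, best, cur_len, cur_start); indexing via pyGetD
-- (in range for every index the loop visits, under Pre_ below)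
def stepA_isb (child p1 : List Int)
    (st : Int × (Option Int × Option Int) × Int × Option Int) (i : Int) :
    Int × (Option Int × Option Int) × Int × Option Int :=
  if PySem.List.pyGetD child i 0 = PySem.List.pyGetD p1 i 0 then
    let cs2 := if st.2.2.1 = 0 then some i else st.2.2.2
    let cl2 := st.2.2.1 + 1
    if cl2 > st.1 then (cl2, (cs2, some i), cl2, cs2) else (st.1, st.2.1, cl2, cs2)
  else (st.1, st.2.1, 0, st.2.2.2)

def infer_slice_bounds (child : List Int) (p1 : List Int) : Option Int × Option Int :=
  let n : Int := child.length
  ((PySem.List.pyRange 1 (n - 1) 1).foldl (stepA_isb child p1) (0, (none, none), 0, none)).2.1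

-- ===== PORT B =====
-- phase 1 body of B: state is (closed runs, open run)
def stepB_isb (child p1 : List Int)
    (st : List (Int × Int) × Option (Int × Int)) (i : Int) :
    List (Int × Int) × Option (Int × Int) :=
  if PySem.List.pyGetD child i 0 = PySem.List.pyGetD p1 i 0 then
    match st.2 with
    | none => (st.1, some (i, i))
    | some c => (st.1, some (c.1, i))
  else
    match st.2 with
    | none => (st.1, none)
    | some c => (st.1 ++ [c], none)

-- phase 2 body of B: first strictly-longest run wins
def selStep_isb (acc : Int × (Option Int × Option Int)) (r : Int × Int) :
    Int × (Option Int × Option Int) :=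
  if r.2 - r.1 + 1 > acc.1 then (r.2 - r.1 + 1, (some r.1, some r.2)) else acc

def infer_slice_bounds_alt (child : List Int) (p1 : List Int) : Option Int × Option Int :=
  let n : Int := child.length
  let st := (PySem.List.pyRange 1 (n - 1) 1).foldl (stepB_isb child p1) ([], none)
  let runs := st.1 ++ st.2.toList
  (runs.foldl selStep_isb (0, (none, none))).2

-- ===== PRECONDITION & SPEC =====
-- Pre_ excludes exactly the inputs where Python A raises IndexError: when the interior loop
-- runs (len(child) > 2) it reads p1[i] for i up to len(child)-2, so p1 must reach that far.
def Pre_infer_slice_bounds (child : List Int) (p1 : List Int) : Prop :=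
  2 < child.length → child.length ≤ p1.length + 1
instance (child : List Int) (p1 : List Int) : Decidable (Pre_infer_slice_bounds child p1) := by
  unfold Pre_infer_slice_bounds; infer_instance

def pvWitness_infer_slice_bounds : List Int × List Int := ([1, 2, 3, 1], [0, 2, 3, 9])

def Spec_infer_slice_bounds (child : List Int) (p1 : List Int) (out : Option Int × Option Int) : Prop := out = infer_slice_bounds_alt child p1
instance (child : List Int) (p1 : List Int) (out : Option Int × Option Int) : Decidable (Spec_infer_slice_bounds child p1 out) := by unfold Spec_infer_slice_bounds; infer_instance

-- ===== CLAIM (what is proved, stated in full; the proofs are below) =====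
def Claim_equal_infer_slice_bounds : Prop := ∀ (child : List Int) (p1 : List Int), Dom_infer_slice_bounds child p1 → Pre_infer_slice_bounds child p1 → Spec_infer_slice_bounds child p1 (infer_slice_bounds child p1)

-- ===== LEMMAS AND PROOFS =====

-- Invariant-carrying loop equivalence: A's running state (best_len, best, cur_len, cur_start)
-- corresponds to B's (closed runs, open run) with best = selection over the runs seen so far.
lemma isb_loop (child p1 : List Int) : ∀ (len : Nat) (a bl : Int)
    (best : Option Int × Option Int) (cl : Int) (cs : Option Int)
    (runs : List (Int × Int)) (cur : Option (Int × Int)),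
    (cur = none → cl = 0) →
    (∀ s e, cur = some (s, e) → cl = e - s + 1 ∧ 0 < cl ∧ cs = some s ∧ e = a - 1) →
    ((bl, best) = (runs ++ cur.toList).foldl selStep_isb (0, (none, none))) →
    (((PySem.List.pyRange a (a + len) 1).foldl (stepA_isb child p1) (bl, best, cl, cs)).2.1 =
      ((((PySem.List.pyRange a (a + len) 1).foldl (stepB_isb child p1) (runs, cur)).1 ++
        ((PySem.List.pyRange a (a + len) 1).foldl (stepB_isb child p1) (runs, cur)).2.toList).foldl
          selStep_isb (0, (none, none))).2) := by
  intro len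
  induction len with
  | zero =>
    intro a bl best cl cs runs cur h1 h2 h3
    rw [PySem.List.pyRange_one_eq_nil (by omega)]
    simpa using (congrArg Prod.snd h3)
  | succ k ih =>
    intro a bl best cl cs runs cur h1 h2 h3
    rw [show a + ((k + 1 : Nat) : Int) = a + (k + 1) by push_cast; ring,
        PySem.List.pyRange_one_cons (by omega),
        show a + (k + 1) = (a + 1) + (k : Int) by ring]
    simp only [List.foldl_cons]
    by_cases hm : PySem.List.pyGetD child a 0 = PySem.List.pyGetD p1 a 0
    · cases cur with
      | none =>
        have hcl : cl = 0 := h1 rfl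
        have hfold : ((bl, best) : Int × (Option Int × Option Int))
            = runs.foldl selStep_isb (0, (none, none)) := by simpa using h3
        have hA : stepA_isb child p1 (bl, best, cl, cs) a
            = if cl + 1 > bl then (cl + 1, (some a, some a), cl + 1, some a)
              else (bl, best, cl + 1, some a) := by
          simp [stepA_isb, hm, hcl]
        have hB : stepB_isb child p1 (runs, none) a = (runs, some (a, a)) := by
          simp [stepB_isb, hm]
        rw [hA, hB]
        have hsel : selStep_isb (bl, best) (a, a)
            = if cl + 1 > bl then ((cl + 1 : Int), ((some a : Option Int), (some a : Option Int)))
              else (bl, best) := by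
          simp only [selStep_isb]
          rcases lt_or_ge bl (cl + 1) with h | h
          · rw [if_pos (by omega), if_pos (by omega)]
            rw [Prod.mk.injEq]; constructor
            · omega
            · rfl
          · rw [if_neg (by omega), if_neg (by omega)]
        have hinv : (if cl + 1 > bl
              then ((cl + 1 : Int), ((some a : Option Int), (some a : Option Int)))
              else (bl, best))
            = (runs ++ (some ((a : Int), (a : Int))).toList).foldl selStep_isb (0, (none, none)) := by
          rw [Option.toList_some, List.foldl_append, ← hfold, List.foldl_cons, List.foldl_nil, hsel]
        by_cases hgt : cl + 1 > bl
        · rw [if_pos hgt]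
          apply ih (a + 1) _ _ _ _ runs (some (a, a))
          · intro h; cases h
          · intro s e he
            injection he with he'; injection he' with hs hee
            subst hs; subst hee
            exact ⟨by omega, by omega, rfl, by ring⟩
          · rw [if_pos hgt] at hinv; exact hinv
        · rw [if_neg hgt]
          apply ih (a + 1) _ _ _ _ runs (some (a, a))
          · intro h; cases h
          · intro s e he
            injection he with he'; injection he' with hs hee
            subst hs; subst hee
            exact ⟨by omega, by omega, rfl, by ring⟩
          · rw [if_neg hgt] at hinv; exact hinv
      | some c =>
        obtain ⟨s, e⟩ := c
        obtain ⟨hcl, hclpos, hcs, he⟩ := h2 s e rfl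
        subst hcs
        have hclne : ¬ cl = 0 := by omega
        have hA : stepA_isb child p1 (bl, best, cl, some s) a
            = if cl + 1 > bl then (cl + 1, (some s, some a), cl + 1, some s)
              else (bl, best, cl + 1, some s) := by
          simp [stepA_isb, hm, hclne]
        have hB : stepB_isb child p1 (runs, some (s, e)) a = (runs, some (s, a)) := by
          simp [stepB_isb, hm]
        rw [hA, hB]
        rcases hq : runs.foldl selStep_isb ((0 : Int), ((none : Option Int), (none : Option Int)))
          with ⟨bl0, best0⟩
        rw [Option.toList_some, List.foldl_append, hq, List.foldl_cons, List.foldl_nil] at h3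
        simp only [selStep_isb] at h3
        have hinv : (if cl + 1 > bl then ((cl + 1 : Int), ((some s : Option Int), (some a : Option Int)))
              else (bl, best))
            = (runs ++ (some ((s : Int), (a : Int))).toList).foldl selStep_isb (0, (none, none)) := by
          rw [Option.toList_some, List.foldl_append, hq, List.foldl_cons, List.foldl_nil]
          simp only [selStep_isb]
          split_ifs at h3 with hc
          · -- open run was already the best: bl = e - s + 1 = cl
            rw [Prod.mk.injEq] at h3
            obtain ⟨hbl, hbest⟩ := h3
            rw [if_pos (by omega), if_pos (by omega), Prod.mk.injEq]
            exact ⟨by omega, rfl⟩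
          · rw [Prod.mk.injEq] at h3
            obtain ⟨hbl, hbest⟩ := h3
            by_cases hgt : cl + 1 > bl
            · rw [if_pos hgt, if_pos (by omega), Prod.mk.injEq]
              exact ⟨by omega, rfl⟩
            · rw [if_neg hgt, if_neg (by omega), Prod.mk.injEq]
              exact ⟨hbl, hbest⟩
        by_cases hgt : cl + 1 > bl
        · rw [if_pos hgt]
          apply ih (a + 1) _ _ _ _ runs (some (s, a))
          · intro h; cases h
          · intro s' e' he'
            injection he' with h'; injection h' with hs' he''
            subst hs'; subst he''
            exact ⟨by omega, by omega, rfl, by ring⟩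
          · rw [if_pos hgt] at hinv; exact hinv
        · rw [if_neg hgt]
          apply ih (a + 1) _ _ _ _ runs (some (s, a))
          · intro h; cases h
          · intro s' e' he'
            injection he' with h'; injection h' with hs' he''
            subst hs'; subst he''
            exact ⟨by omega, by omega, rfl, by ring⟩
          · rw [if_neg hgt] at hinv; exact hinv
    · have hA : stepA_isb child p1 (bl, best, cl, cs) a = (bl, best, 0, cs) := by
        simp [stepA_isb, hm]
      cases cur with
      | none =>
        have hB : stepB_isb child p1 (runs, none) a = (runs, none) := by
          simp [stepB_isb, hm]
        rw [hA, hB]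
        apply ih (a + 1) _ _ 0 cs runs none
        · intro _; rfl
        · intro s e he; cases he
        · simpa using h3
      | some c =>
        have hB : stepB_isb child p1 (runs, some c) a = (runs ++ [c], none) := by
          simp [stepB_isb, hm]
        rw [hA, hB]
        apply ih (a + 1) _ _ 0 cs (runs ++ [c]) none
        · intro _; rfl
        · intro s e he; cases he
        · simpa using h3

lemma isb_main (child p1 : List Int) :
    infer_slice_bounds child p1 = infer_slice_bounds_alt child p1 := by
  unfold infer_slice_bounds infer_slice_bounds_alt
  have hr : PySem.List.pyRange 1 ((child.length : Int) - 1) 1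
      = PySem.List.pyRange 1 (1 + (((child.length : Int) - 2).toNat : Int)) 1 := by
    by_cases h : 2 ≤ (child.length : Int)
    · congr 1; omega
    · rw [PySem.List.pyRange_one_eq_nil (by omega), PySem.List.pyRange_one_eq_nil (by omega)]
  simp only []
  rw [hr]
  exact isb_loop child p1 (((child.length : Int) - 2).toNat) 1 0 (none, none) 0 none [] none
    (fun _ => rfl) (fun s e he => by cases he) rfl

-- ===== VERDICT (by name: the statement is the Claim_ definition above) =====
theorem infer_slice_bounds_spec : Claim_equal_infer_slice_bounds := by
  intro child p1 _ _
  unfold Spec_infer_slice_bounds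
  exact isb_main child p1
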